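-- pv_equiv track=rewrite | github.com/whyismynamerudy/pitch-please | backend/judges/judge_consensus.py | clean_json_string
-- ===== SOURCE A (Python) =====
-- def clean_json_string(text: str) -> str:
--     """Clean up a string that might contain JSON with markdown formatting."""
--     if "```" in text:
--         # Extract content between ```json and ```
--         lines = text.split('\n')
--         cleaned_lines = []
--         is_json_block = False
--
--         for line in lines:
--             if line.strip().startswith("```"):
--                 is_json_block = not is_json_block
--                 continue
--             if is_json_block:
--                 cleaned_lines.append(line)
--
--         if cleaned_lines:
--             return '\n'.join(cleaned_lines)
--
--     # If no markdown blocks found, return original text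
--     return text
-- ===== SOURCE B (Python) =====
-- def clean_json_string(text: str) -> str:
--     """Clean up a string that might contain JSON with markdown formatting."""
--     if "```" not in text:
--         return text
--     lines = text.split('\n')
--     out = []
--     rest = lines
--     while rest:
--         line, rest = rest[0], rest[1:]
--         if line.strip().startswith("```"):
--             # grab everything up to the closing fence (or the end), then jump past it
--             k = 0
--             while k < len(rest) and not rest[k].strip().startswith("```"):
--                 k += 1
--             out += rest[:k]
--             rest = rest[k + 1:]
--     return '\n'.join(out) if out else text
-- ===== Notes on version B (the rewrite author's own statement) =====
-- stated objective: alternative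
-- what changed: Replaces A's single pass with a boolean in/out-of-block toggle by a block-at-a-time scan: on hitting a fence line it scans ahead for the matching closing fence (or the end), copies the enclosed slice wholesale, and jumps past it.
import Mathlib
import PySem

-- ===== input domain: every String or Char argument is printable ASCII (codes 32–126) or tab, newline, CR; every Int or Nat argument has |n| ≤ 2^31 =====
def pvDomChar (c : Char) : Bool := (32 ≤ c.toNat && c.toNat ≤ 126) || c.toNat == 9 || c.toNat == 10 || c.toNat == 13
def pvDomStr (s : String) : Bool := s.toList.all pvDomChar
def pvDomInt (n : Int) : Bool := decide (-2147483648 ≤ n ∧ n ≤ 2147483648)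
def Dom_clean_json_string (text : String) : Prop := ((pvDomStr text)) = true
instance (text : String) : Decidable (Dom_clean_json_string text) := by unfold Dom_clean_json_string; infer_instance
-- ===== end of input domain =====

-- B replaces A's boolean in/out toggle pass by a block-at-a-time scan (find closing fence, copy the slice, jump past it); same behaviour, alternative structure.

-- ===== PORT A =====
-- line.strip().startswith("```")
def pvFence (l : List Char) : Bool :=
  PySem.Chars.startswith (PySem.Chars.strip l) ['`', '`', '`']

-- the body of A's for-loop: state = (is_json_block, cleaned_lines)
def pvStep (s : Bool × List (List Char)) (line : List Char) : Bool × List (List Char) :=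
  if pvFence line then (!s.1, s.2)
  else if s.1 then (s.1, s.2 ++ [line]) else s

def clean_json_string (text : String) : String :=
  if PySem.Str.isIn "```" text then
    let cleaned := ((PySem.Chars.splitOn text.toList ['\n']).foldl pvStep (false, [])).2
    if cleaned ≠ [] then String.ofList (PySem.Chars.join ['\n'] cleaned) else text
  else text

-- ===== PORT B =====
-- B's inner while: distance to the first fence line of rest (or len(rest))
def pvScanK : List (List Char) → Nat
  | [] => 0
  | l :: r => if pvFence l then 0 else pvScanK r + 1

-- B's outer while over (out, rest)
def pvLoopB (out : List (List Char)) : List (List Char) → List (List Char)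
  | [] => out
  | l :: r =>
    if pvFence l then
      pvLoopB (out ++ r.take (pvScanK r)) (r.drop (pvScanK r + 1))
    else pvLoopB out r
  termination_by rest => rest.length
  decreasing_by
    · simp only [List.length_drop, List.length_cons]; omega
    · simp only [List.length_cons]; omega

def clean_json_string_alt (text : String) : String :=
  if PySem.Str.isIn "```" text then
    let out := pvLoopB [] (PySem.Chars.splitOn text.toList ['\n'])
    if out ≠ [] then String.ofList (PySem.Chars.join ['\n'] out) else text
  else text

-- ===== PRECONDITION & SPEC =====
def Spec_clean_json_string (text : String) (out : String) : Prop := out = clean_json_string_alt text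
instance (text : String) (out : String) : Decidable (Spec_clean_json_string text out) := by unfold Spec_clean_json_string; infer_instance

-- ===== CLAIM (what is proved, stated in full; the proofs are below) =====
def Claim_equal_clean_json_string : Prop := ∀ (text : String), Dom_clean_json_string text → Spec_clean_json_string text (clean_json_string text)

-- ===== LEMMAS AND PROOFS =====

theorem pvLoopB_nil (out : List (List Char)) : pvLoopB out [] = out := by
  rw [pvLoopB]

theorem pvLoopB_cons_fence (out : List (List Char)) (l : List Char) (r : List (List Char))
    (h : pvFence l = true) :
    pvLoopB out (l :: r) = pvLoopB (out ++ r.take (pvScanK r)) (r.drop (pvScanK r + 1)) := by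
  rw [pvLoopB]; simp [h]

theorem pvLoopB_cons_not (out : List (List Char)) (l : List Char) (r : List (List Char))
    (h : ¬ pvFence l = true) :
    pvLoopB out (l :: r) = pvLoopB out r := by
  rw [pvLoopB]; simp [h]

-- A's toggle fold equals B's block-at-a-time loop, both from an arbitrary accumulator;
-- the 'true'-flag state corresponds to B having already grabbed the prefix up to the closing fence.
theorem pvKey (lines : List (List Char)) : ∀ acc : List (List Char),
    ((lines.foldl pvStep (false, acc)).2 = pvLoopB acc lines) ∧
    ((lines.foldl pvStep (true, acc)).2
      = pvLoopB (acc ++ lines.take (pvScanK lines)) (lines.drop (pvScanK lines + 1))) := by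
  induction lines with
  | nil => intro acc; simp [pvLoopB_nil]
  | cons l r ih =>
    intro acc
    by_cases h : pvFence l = true
    · constructor
      · simp [List.foldl_cons, pvStep, h, pvLoopB_cons_fence _ _ _ h, (ih acc).2]
      · simp [List.foldl_cons, pvStep, h, pvScanK, pvLoopB_cons_fence _ _ _ h, (ih acc).1]
    · constructor
      · simp [List.foldl_cons, pvStep, h, pvLoopB_cons_not _ _ _ h, (ih acc).1]
      · simp [List.foldl_cons, pvStep, h, pvScanK, (ih (acc ++ [l])).2]

-- ===== VERDICT (by name: the statement is the Claim_ definition above) =====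
theorem clean_json_string_spec : Claim_equal_clean_json_string := by
  intro text _
  unfold Spec_clean_json_string clean_json_string clean_json_string_alt
  rw [(pvKey (PySem.Chars.splitOn text.toList ['\n']) []).1]
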